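-- pv_equiv track=rewrite | github.com/duranduman06/CodeStepByStep-Python-Exercises | switch_pairs.py | switch_pairs
-- ===== SOURCE A (Python) =====
-- def switch_pairs(str):
--     response = ''
--     i = 0
--     if len(str) < 2:
--         return str
--     while i < len(str) - 1:
--         response += str[i + 1]
--         response += str[i]
--         i += 2
--     if len(str) % 2 != 0:
--         response += str[-1]
--     return response
-- ===== SOURCE B (Python) =====
-- def switch_pairs(str):
--     # Walk the string from the END, pushing each pair's characters so that the
--     # list holds the answer reversed; one final reverse+join produces it.
--     rev = []
--     i = len(str)
--     if i % 2:
--         rev.append(str[i - 1])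
--         i -= 1
--     while i > 0:
--         rev.append(str[i - 2])
--         rev.append(str[i - 1])
--         i -= 2
--     return ''.join(reversed(rev))
-- ===== Notes on version B (the rewrite author's own statement) =====
-- stated objective: faster
-- what changed: B traverses the string back-to-front (handling a possible odd leftover first), accumulating the output in reverse order in a list and producing the result with one final reverse+join, instead of A's forward index loop growing a string by repeated += with a trailing odd-tail branch.
import Mathlib
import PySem

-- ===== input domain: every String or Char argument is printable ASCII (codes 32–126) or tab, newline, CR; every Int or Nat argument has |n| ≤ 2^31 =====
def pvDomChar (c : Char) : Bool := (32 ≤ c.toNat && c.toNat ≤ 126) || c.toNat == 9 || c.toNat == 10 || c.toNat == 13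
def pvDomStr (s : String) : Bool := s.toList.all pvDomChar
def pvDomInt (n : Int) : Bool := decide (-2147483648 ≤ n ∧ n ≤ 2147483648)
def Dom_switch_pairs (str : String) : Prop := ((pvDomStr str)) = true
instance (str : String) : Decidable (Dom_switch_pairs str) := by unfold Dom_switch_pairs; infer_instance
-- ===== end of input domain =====

-- B traverses the string back-to-front (odd leftover handled first), accumulating the
-- output reversed in a list, with one final reverse+join instead of repeated string concatenation (objective: faster, measured).

-- ===== PORT A =====
-- the while loop: response accumulator, index i stepping by 2 while i < len - 1
def pvALoop (cs : List Char) (response : List Char) (i : Nat) : List Char :=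
  if i < cs.length - 1 then
    pvALoop cs (response ++ [cs.getD (i + 1) ' ', cs.getD i ' ']) (i + 2)
  else response
termination_by cs.length - i
decreasing_by omega

def switch_pairs (str : String) : String :=
  let cs := str.toList
  if cs.length < 2 then str
  else
    let r := pvALoop cs [] 0
    -- str[-1]: the last character (cs is nonempty here, so the negative index resolves to len-1)
    let r := if cs.length % 2 ≠ 0 then r ++ [cs.getD (cs.length - 1) ' '] else r
    String.ofList r

-- ===== PORT B =====
-- the while loop: rev accumulator, index i stepping down by 2 while i > 0
def pvBLoop (cs : List Char) (rev : List Char) (i : Nat) : List Char :=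
  if 0 < i then
    pvBLoop cs (rev ++ [cs.getD (i - 2) ' ', cs.getD (i - 1) ' ']) (i - 2)
  else rev
termination_by i
decreasing_by omega

def switch_pairs_alt (str : String) : String :=
  let cs := str.toList
  let n := cs.length
  -- if i % 2: rev.append(str[i-1]); i -= 1
  let p : List Char × Nat := if n % 2 ≠ 0 then ([cs.getD (n - 1) ' '], n - 1) else ([], n)
  String.ofList ((pvBLoop cs p.1 p.2).reverse)

-- ===== PRECONDITION & SPEC =====
def Spec_switch_pairs (str : String) (out : String) : Prop := out = switch_pairs_alt str
instance (str : String) (out : String) : Decidable (Spec_switch_pairs str out) := by unfold Spec_switch_pairs; infer_instance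

-- ===== CLAIM (what is proved, stated in full; the proofs are below) =====
def Claim_equal_switch_pairs : Prop := ∀ (str : String), Dom_switch_pairs str → Spec_switch_pairs str (switch_pairs str)

-- ===== LEMMAS AND PROOFS =====

-- reference form: the pair-swapped prefix, dropping a leftover odd character
def pvF : List Char → List Char
  | a :: b :: rest => b :: a :: pvF rest
  | _ => []

theorem pvALoop_eq (cs res : List Char) (i : Nat) :
    pvALoop cs res i = res ++ pvF (cs.drop i) := by
  fun_induction pvALoop cs res i with
  | case1 res i h ih =>
      rw [ih]
      have h1 : i < cs.length := by omega
      have h2 : i + 1 < cs.length := by omega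
      have hd : cs.drop i = cs[i] :: cs[i + 1] :: cs.drop (i + 2) := by
        rw [List.drop_eq_getElem_cons h1, List.drop_eq_getElem_cons h2]
      rw [hd]
      simp [pvF, List.getElem?_eq_getElem h1, List.getElem?_eq_getElem h2]
  | case2 res i h =>
      have hl : (cs.drop i).length ≤ 1 := by simp; omega
      have : pvF (cs.drop i) = [] := by
        match hm : cs.drop i with
        | [] => rfl
        | [a] => rfl
        | a :: b :: t => rw [hm] at hl; simp at hl
      simp [this]

theorem pvF_append_pair (l : List Char) (a b : Char) (h : l.length % 2 = 0) :
    pvF (l ++ [a, b]) = pvF l ++ [b, a] := by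
  induction l using pvF.induct with
  | case1 x y rest ih =>
      simp only [List.length_cons] at h
      simp only [List.cons_append, pvF, ih (by omega), List.cons_append]
  | case2 l hne =>
      match l with
      | [] => rfl
      | [x] => simp at h
      | x :: y :: t => exact absurd rfl (hne x y t)

theorem pvBLoop_eq (cs rev : List Char) (i : Nat) (hle : i ≤ cs.length) (hev : i % 2 = 0) :
    pvBLoop cs rev i = rev ++ (pvF (cs.take i)).reverse := by
  fun_induction pvBLoop cs rev i with
  | case1 rev i h ih =>
      have h2 : 2 ≤ i := by omega
      have ha : i - 2 < cs.length := by omega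
      have hb : i - 1 < cs.length := by omega
      have hdrop : cs.drop (i - 2) = cs[i - 2] :: cs[i - 1] :: cs.drop i := by
        rw [List.drop_eq_getElem_cons ha, show i - 2 + 1 = i - 1 by omega,
          List.drop_eq_getElem_cons hb, show i - 1 + 1 = i by omega]
      have htake : cs.take i = cs.take (i - 2) ++ [cs[i - 2], cs[i - 1]] := by
        conv_lhs => rw [show i = (i - 2) + 2 by omega, List.take_add]
        rw [hdrop]
        simp
      rw [ih (by omega) (by omega), htake,
        pvF_append_pair _ _ _ (by simp; omega)]
      simp [List.getD_eq_getElem?_getD, List.getElem?_eq_getElem ha, List.getElem?_eq_getElem hb]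
  | case2 rev i h =>
      have : i = 0 := by omega
      subst this
      simp [pvF]

-- pvF ignores the odd leftover character
theorem pvF_take_pred (l : List Char) (h : l.length % 2 = 1) :
    pvF (l.take (l.length - 1)) = pvF l := by
  induction l using pvF.induct with
  | case1 x y rest ih =>
      simp only [List.length_cons] at h ⊢
      have e : rest.length + 1 + 1 - 1 = rest.length - 1 + 1 + 1 := by omega
      rw [e]
      simp only [List.take_succ_cons, pvF]
      rw [ih (by omega)]
  | case2 l hne =>
      match l with
      | [] => simp at h
      | [x] => rfl
      | x :: y :: t => exact absurd rfl (hne x y t)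

theorem switch_pairs_eq (str : String) :
    switch_pairs str = String.ofList
      (pvF str.toList ++ (if str.toList.length % 2 = 1 then [str.toList.getD (str.toList.length - 1) ' '] else [])) := by
  unfold switch_pairs
  by_cases hlt : str.toList.length < 2
  · simp only [hlt, if_true]
    match hm : str.toList with
    | [] => exact String.ofList_toList.symm.trans (by rw [hm]; rfl)
    | [a] => exact String.ofList_toList.symm.trans (by rw [hm]; rfl)
    | a :: b :: t => rw [hm] at hlt; simp at hlt
  · simp only [hlt, if_false]
    rw [pvALoop_eq, List.drop_zero, List.nil_append]
    split_ifs with h1 h2 <;> simp_all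

theorem switch_pairs_alt_eq (str : String) :
    switch_pairs_alt str = String.ofList
      (pvF str.toList ++ (if str.toList.length % 2 = 1 then [str.toList.getD (str.toList.length - 1) ' '] else [])) := by
  simp only [switch_pairs_alt]
  by_cases hodd : str.toList.length % 2 = 1
  · rw [if_pos (by omega : str.toList.length % 2 ≠ 0), if_pos hodd]
    rw [pvBLoop_eq _ _ _ (by omega) (by omega)]
    rw [pvF_take_pred _ hodd]
    simp
  · have h0 : str.toList.length % 2 = 0 := by omega
    rw [if_neg (by omega : ¬ str.toList.length % 2 ≠ 0), if_neg hodd]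
    rw [pvBLoop_eq _ _ _ le_rfl h0]
    rw [List.take_length]
    simp

-- ===== VERDICT (by name: the statement is the Claim_ definition above) =====
theorem switch_pairs_spec : Claim_equal_switch_pairs := by
  intro str _
  unfold Spec_switch_pairs
  rw [switch_pairs_eq, switch_pairs_alt_eq]
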